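-- pv_equiv track=rewrite | github.com/Wilsonnijc-bot/Claw-Insurance | nanobot/channels/whatsapp_self_control.py | _extract_last_block
-- ===== SOURCE A (Python) =====
-- def _extract_last_block(text: str, marker: str) -> str | None:
--     marker_norm = marker.strip().casefold()
--     in_block = False
--     current_lines: list[str] = []
--     blocks: list[str] = []
--
--     for raw_line in text.splitlines():
--         line = raw_line.strip().casefold()
--         if line == marker_norm:
--             if in_block:
--                 blocks.append("\n".join(current_lines).strip())
--                 current_lines = []
--                 in_block = False
--             else:
--                 in_block = True
--                 current_lines = []
--             continue
--
--         if in_block: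
--             current_lines.append(raw_line)
--
--     return blocks[-1] if blocks else None
-- ===== SOURCE B (Python) =====
-- def _extract_last_block(text: str, marker: str) -> str | None:
--     marker_norm = marker.strip().casefold()
--     lines = text.splitlines()
--     idx = [i for i, line in enumerate(lines) if line.strip().casefold() == marker_norm]
--     if len(idx) < 2:
--         return None
--     c = len(idx) // 2
--     return "\n".join(lines[idx[2 * c - 2] + 1:idx[2 * c - 1]]).strip()
-- ===== Notes on version B (the rewrite author's own statement) =====
-- stated objective: alternative
-- what changed: Replaces the in_block toggle state machine that accumulates every block's lines with an index table of marker lines: pair the marker indices, slice the last complete block out of the line list, join and strip it.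
import Mathlib
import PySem

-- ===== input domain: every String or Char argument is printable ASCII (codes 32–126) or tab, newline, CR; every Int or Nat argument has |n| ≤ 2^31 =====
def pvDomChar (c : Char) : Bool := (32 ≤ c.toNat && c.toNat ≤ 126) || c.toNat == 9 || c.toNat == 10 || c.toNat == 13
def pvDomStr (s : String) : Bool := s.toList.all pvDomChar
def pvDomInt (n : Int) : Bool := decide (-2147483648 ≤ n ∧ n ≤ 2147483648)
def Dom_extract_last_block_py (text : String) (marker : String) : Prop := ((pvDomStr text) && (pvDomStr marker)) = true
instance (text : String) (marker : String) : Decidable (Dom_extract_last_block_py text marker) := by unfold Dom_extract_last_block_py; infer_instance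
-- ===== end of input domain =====

-- B replaces A's in_block toggle state machine by an index table of the marker lines
-- plus one slice of the last complete block (alternative decomposition; same cost).

-- ===== PORT A =====
-- literal transliteration of A's toggle loop (casefold = lower, exact on the ASCII domain)
def extract_last_block_py (text : String) (marker : String) : Option String :=
  let markerNorm := PySem.Str.lower (PySem.Str.strip marker)
  let st := (PySem.Str.splitlines text).foldl
    (fun (st : Bool × List String × List String) (rawLine : String) =>
      let line := PySem.Str.lower (PySem.Str.strip rawLine)
      if line == markerNorm then
        if st.1 then (false, ([] : List String), st.2.2 ++ [PySem.Str.strip (PySem.Str.join "\n" st.2.1)])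
        else (true, ([] : List String), st.2.2)
      else if st.1 then (st.1, st.2.1 ++ [rawLine], st.2.2)
      else st)
    (false, [], [])
  if st.2.2.isEmpty then none else PySem.List.pyGet? st.2.2 (-1)

-- ===== PORT B =====
-- literal transliteration of Source B: marker-index table, pair count, one slice
def extract_last_block_py_alt (text : String) (marker : String) : Option String :=
  let markerNorm := PySem.Str.lower (PySem.Str.strip marker)
  let lines := PySem.Str.splitlines text
  let idx := ((PySem.List.enumerate lines).filter
      (fun q => PySem.Str.lower (PySem.Str.strip q.2) == markerNorm)).map (·.1)
  if idx.length < 2 then none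
  else
    let c : Int := PySem.Int.floordiv (idx.length : Int) 2
    -- idx[2c-2], idx[2c-1] are provably in range, so pyGetD is the same lookup made total
    let o := PySem.List.pyGetD idx (2 * c - 2) 0
    let cl := PySem.List.pyGetD idx (2 * c - 1) 0
    some (PySem.Str.strip (PySem.Str.join "\n" (PySem.List.slice lines (some (o + 1)) (some cl))))

-- ===== PRECONDITION & SPEC =====
def Spec_extract_last_block_py (text : String) (marker : String) (out : Option String) : Prop := out = extract_last_block_py_alt text marker
instance (text : String) (marker : String) (out : Option String) : Decidable (Spec_extract_last_block_py text marker out) := by unfold Spec_extract_last_block_py; infer_instance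

-- ===== CLAIM (what is proved, stated in full; the proofs are below) =====
def Claim_equal_extract_last_block_py : Prop := ∀ (text : String) (marker : String), Dom_extract_last_block_py text marker → Spec_extract_last_block_py text marker (extract_last_block_py text marker)

-- ===== LEMMAS AND PROOFS =====

-- the blocks A's toggle loop collects, as mutual structural recursion
mutual
def pvPairBlocks (p : String → Bool) : List String → List String
  | [] => []
  | l :: ls => if p l then pvOpenBlocks p [] ls else pvPairBlocks p ls
def pvOpenBlocks (p : String → Bool) (cur : List String) : List String → List String
  | [] => []
  | l :: ls =>
      if p l then PySem.Str.strip (PySem.Str.join "\n" cur) :: pvPairBlocks p ls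
      else pvOpenBlocks p (cur ++ [l]) ls
end

-- A's loop body, named (definitionally equal to the lambda in port A)
def pvStep (mn : String) (st : Bool × List String × List String) (rawLine : String) :
    Bool × List String × List String :=
  let line := PySem.Str.lower (PySem.Str.strip rawLine)
  if line == mn then
    if st.1 then (false, ([] : List String), st.2.2 ++ [PySem.Str.strip (PySem.Str.join "\n" st.2.1)])
    else (true, ([] : List String), st.2.2)
  else if st.1 then (st.1, st.2.1 ++ [rawLine], st.2.2)
  else st

-- positions of the marker lines
def pvIdxs (p : String → Bool) : List String → List Nat
  | [] => []
  | l :: ls => if p l then 0 :: (pvIdxs p ls).map (· + 1) else (pvIdxs p ls).map (· + 1)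

-- consecutive disjoint pairs
def pvChunkPairs : List Nat → List (Nat × Nat)
  | [] => []
  | [_] => []
  | a :: b :: r => (a, b) :: pvChunkPairs r

def pvSliceBlock (ls : List String) (q : Nat × Nat) : String :=
  PySem.Str.strip (PySem.Str.join "\n" ((ls.drop (q.1 + 1)).take (q.2 - q.1 - 1)))

theorem pvFold_eq (mn : String) (ls : List String) (inb : Bool) (cur bs : List String) :
    (ls.foldl (pvStep mn) (inb, cur, bs)).2.2
      = bs ++ (if inb then pvOpenBlocks (fun l => PySem.Str.lower (PySem.Str.strip l) == mn) cur ls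
               else pvPairBlocks (fun l => PySem.Str.lower (PySem.Str.strip l) == mn) ls) := by
  induction ls generalizing inb cur bs with
  | nil => cases inb <;> simp [pvOpenBlocks, pvPairBlocks]
  | cons l ls ih =>
    by_cases hp : (PySem.Str.lower (PySem.Str.strip l) == mn) = true
    · cases inb
      · have h1 : pvStep mn (false, cur, bs) l = (true, [], bs) := by simp [pvStep, hp]
        rw [List.foldl_cons, h1, ih]
        simp [pvPairBlocks, hp]
      · have h1 : pvStep mn (true, cur, bs) l
            = (false, [], bs ++ [PySem.Str.strip (PySem.Str.join "\n" cur)]) := by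
          simp [pvStep, hp]
        rw [List.foldl_cons, h1, ih]
        simp [pvOpenBlocks, hp]
    · cases inb
      · have h1 : pvStep mn (false, cur, bs) l = (false, cur, bs) := by simp [pvStep, hp]
        rw [List.foldl_cons, h1, ih]
        simp [pvPairBlocks, hp]
      · have h1 : pvStep mn (true, cur, bs) l = (true, cur ++ [l], bs) := by simp [pvStep, hp]
        rw [List.foldl_cons, h1, ih]
        simp [pvOpenBlocks, hp]

theorem pvChunkPairs_map_succ (l : List Nat) :
    pvChunkPairs (l.map (· + 1)) = (pvChunkPairs l).map (fun q => (q.1 + 1, q.2 + 1)) := by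
  induction l using pvChunkPairs.induct with
  | case1 => simp [pvChunkPairs]
  | case2 a => simp [pvChunkPairs]
  | case3 a b r ih => simp [pvChunkPairs, ih]

theorem pvChunkPairs_length (l : List Nat) : (pvChunkPairs l).length = l.length / 2 := by
  induction l using pvChunkPairs.induct with
  | case1 => simp [pvChunkPairs]
  | case2 a => simp [pvChunkPairs]
  | case3 a b r ih =>
    simp only [pvChunkPairs, List.length_cons, ih]
    omega

theorem pvChunkPairs_getLast (l : List Nat) (h : 2 ≤ l.length) :
    (pvChunkPairs l).getLast? = some (l.getD (2 * (l.length / 2) - 2) 0, l.getD (2 * (l.length / 2) - 1) 0) := by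
  induction l using pvChunkPairs.induct with
  | case1 => simp at h
  | case2 a => simp at h
  | case3 a b r ih =>
    by_cases hr : 2 ≤ r.length
    · have hlen := pvChunkPairs_length r
      rcases hcp : pvChunkPairs r with _ | ⟨c, t⟩
      · rw [hcp] at hlen; simp at hlen; omega
      · rw [pvChunkPairs, hcp, List.getLast?_cons_cons, ← hcp, ih hr]
        have h1 : 2 * ((a :: b :: r).length / 2) - 2 = (2 * (r.length / 2) - 2) + 2 := by
          simp only [List.length_cons]; omega
        have h2 : 2 * ((a :: b :: r).length / 2) - 1 = (2 * (r.length / 2) - 1) + 2 := by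
          simp only [List.length_cons]; omega
        rw [h1, h2]
        simp [List.getD]
    · have hnil : pvChunkPairs r = [] := by
        match r, hr with
        | [], _ => rfl
        | [x], _ => rfl
        | x :: y :: r', hr => exact absurd (by simp) hr
      have h1 : 2 * ((a :: b :: r).length / 2) - 2 = 0 := by
        simp only [List.length_cons]; omega
      have h2 : 2 * ((a :: b :: r).length / 2) - 1 = 1 := by
        simp only [List.length_cons]; omega
      rw [pvChunkPairs, hnil, h1, h2]
      simp [List.getD]

theorem pvSliceBlock_cons (l : String) (ls : List String) (q : Nat × Nat) :
    pvSliceBlock (l :: ls) (q.1 + 1, q.2 + 1) = pvSliceBlock ls q := by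
  simp [pvSliceBlock]

theorem pvShiftMap (l : String) (ls : List String) (rest : List Nat) :
    (pvChunkPairs (rest.map (· + 1))).map (pvSliceBlock (l :: ls))
      = (pvChunkPairs rest).map (pvSliceBlock ls) := by
  rw [pvChunkPairs_map_succ, List.map_map]
  apply List.map_congr_left
  intro q _
  exact pvSliceBlock_cons l ls q

theorem pvBlocks_eq_chunks (p : String → Bool) (ls : List String) :
    pvPairBlocks p ls = (pvChunkPairs (pvIdxs p ls)).map (pvSliceBlock ls)
    ∧ ∀ cur, pvOpenBlocks p cur ls =
        (match pvIdxs p ls with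
         | [] => []
         | i :: rest =>
             PySem.Str.strip (PySem.Str.join "\n" (cur ++ ls.take i))
               :: (pvChunkPairs rest).map (pvSliceBlock ls)) := by
  induction ls with
  | nil => exact ⟨by simp [pvPairBlocks, pvIdxs, pvChunkPairs], fun cur => by simp [pvOpenBlocks, pvIdxs]⟩
  | cons l ls ih =>
    obtain ⟨ihF, ihT⟩ := ih
    by_cases hp : p l = true
    · constructor
      · rw [pvPairBlocks, if_pos hp, pvIdxs, if_pos hp, ihT []]
        cases his : pvIdxs p ls with
        | nil => simp [pvChunkPairs]
        | cons i rest =>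
          simp only [List.map_cons, pvChunkPairs, List.map_cons, pvShiftMap l ls rest]
          congr 1
      · intro cur
        rw [pvOpenBlocks, if_pos hp, pvIdxs, if_pos hp, ihF]
        simp only [List.take_zero, List.append_nil]
        rw [← pvShiftMap l ls (pvIdxs p ls)]
    · have hp' : ¬ p l = true := hp
      constructor
      · rw [pvPairBlocks, if_neg hp', pvIdxs, if_neg hp', ihF, ← pvShiftMap l ls (pvIdxs p ls)]
      · intro cur
        rw [pvOpenBlocks, if_neg hp', pvIdxs, if_neg hp', ihT (cur ++ [l])]
        cases his : pvIdxs p ls with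
        | nil => simp
        | cons i rest =>
          simp only [List.map_cons, pvShiftMap l ls rest]
          rw [List.take_succ_cons]
          simp [List.append_assoc]

theorem pvEnum_filter (p : String → Bool) (ls : List String) (s : Int) :
    (((PySem.List.enumerate ls s).filter (fun q => p q.2)).map (·.1))
      = (pvIdxs p ls).map (fun n : Nat => s + (n : Int)) := by
  induction ls generalizing s with
  | nil => simp [PySem.List.enumerate_nil, pvIdxs]
  | cons l ls ih =>
    rw [PySem.List.enumerate_cons, pvIdxs]
    by_cases hp : p l = true
    · rw [if_pos hp, List.filter_cons_of_pos (by simpa using hp), List.map_cons, ih]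
      simp only [List.map_cons, List.map_map]
      congr 1
      · simp
      · apply List.map_congr_left
        intro n _
        simp
        ring
    · rw [if_neg hp, List.filter_cons_of_neg (by simpa using hp), ih, List.map_map]
      apply List.map_congr_left
      intro n _
      simp
      ring

theorem pvGetD_map_cast (l : List Nat) (n : Nat) :
    (l.map (fun k : Nat => (k : Int))).getD n 0 = ((l.getD n 0 : Nat) : Int) := by
  simp [List.getD]
  cases l[n]? <;> simp

theorem pvFloordiv_two (L : Nat) : PySem.Int.floordiv (L : Int) 2 = ((L / 2 : Nat) : Int) := by
  simp [PySem.Int.floordiv, Int.fdiv_eq_ediv_of_nonneg]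

-- ===== VERDICT (by name: the statement is the Claim_ definition above) =====
theorem extract_last_block_py_spec : Claim_equal_extract_last_block_py := by
  unfold Claim_equal_extract_last_block_py Spec_extract_last_block_py
  intro text marker _
  have hmain : ∀ (mn : String) (ls : List String),
      (let st := ls.foldl (pvStep mn) (false, [], []);
       if st.2.2.isEmpty then none else PySem.List.pyGet? st.2.2 (-1))
      = (let idx := ((PySem.List.enumerate ls).filter
            (fun q => PySem.Str.lower (PySem.Str.strip q.2) == mn)).map (·.1);
         if idx.length < 2 then none
         else
           let c : Int := PySem.Int.floordiv (idx.length : Int) 2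
           let o := PySem.List.pyGetD idx (2 * c - 2) 0
           let cl := PySem.List.pyGetD idx (2 * c - 1) 0
           some (PySem.Str.strip (PySem.Str.join "\n"
             (PySem.List.slice ls (some (o + 1)) (some cl))))) := by
    intro mn ls
    set p : String → Bool := fun l => PySem.Str.lower (PySem.Str.strip l) == mn with hp
    set is := pvIdxs p ls with his
    set L := is.length with hL
    have hblocks : (ls.foldl (pvStep mn) (false, [], [])).2.2
        = (pvChunkPairs is).map (pvSliceBlock ls) := by
      rw [pvFold_eq mn ls false [] []]
      simp only [List.nil_append, Bool.false_eq_true, if_false]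
      exact (pvBlocks_eq_chunks p ls).1
    have hidx : ((PySem.List.enumerate ls).filter
          (fun q => PySem.Str.lower (PySem.Str.strip q.2) == mn)).map (·.1)
        = is.map (fun n : Nat => (n : Int)) := by
      rw [show ((PySem.List.enumerate ls).filter
            (fun q => PySem.Str.lower (PySem.Str.strip q.2) == mn)).map (·.1)
          = ((PySem.List.enumerate ls 0).filter (fun q => p q.2)).map (·.1) from rfl,
        pvEnum_filter]
      apply List.map_congr_left
      intro n _
      simp
    simp only [hblocks, hidx, List.length_map]
    by_cases hlt : L < 2
    · have hL0 : L / 2 = 0 := by omega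
      have : (pvChunkPairs is).map (pvSliceBlock ls) = [] := by
        have := pvChunkPairs_length is
        rw [← hL, hL0] at this
        simp [List.length_eq_zero_iff] at this ⊢
        simp [this]
      rw [this]
      simp [hlt, ← hL]
    · have h2 : 2 ≤ L := by omega
      have hhalf : 1 ≤ L / 2 := by omega
      have hne : (pvChunkPairs is).map (pvSliceBlock ls) ≠ [] := by
        intro hnil
        have hlen := pvChunkPairs_length is
        have h0 : pvChunkPairs is = [] := by
          cases hcp : pvChunkPairs is with
          | nil => rfl
          | cons x t => rw [hcp] at hnil; simp at hnil
        rw [h0] at hlen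
        simp at hlen
        rw [← hL] at hlen
        omega
      rw [if_neg (by simpa using hne), if_neg (by rw [← hL]; omega)]
      rw [PySem.List.pyGet?_neg_one, List.getLast?_map, pvChunkPairs_getLast is (by rw [← hL]; exact h2)]
      set a := is.getD (2 * (is.length / 2) - 2) 0 with ha
      set b := is.getD (2 * (is.length / 2) - 1) 0 with hb
      have hc : PySem.Int.floordiv ((is.length : Int)) 2 = ((L / 2 : Nat) : Int) := by
        rw [← hL]
        exact pvFloordiv_two L
      rw [hc]
      have hia : (2 * (((L / 2 : Nat) : Int)) - 2) = (((2 * (L / 2) - 2 : Nat)) : Int) := by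
        push_cast [Nat.cast_sub (by omega : 2 ≤ 2 * (L / 2))]
        ring
      have hib : (2 * (((L / 2 : Nat) : Int)) - 1) = (((2 * (L / 2) - 1 : Nat)) : Int) := by
        push_cast [Nat.cast_sub (by omega : 1 ≤ 2 * (L / 2))]
        ring
      rw [hia, hib, PySem.List.pyGetD_natCast, PySem.List.pyGetD_natCast,
        pvGetD_map_cast, pvGetD_map_cast]
      have hoa : ((is.getD (2 * (L / 2) - 2) 0 : Nat) : Int) + 1
          = (((is.getD (2 * (L / 2) - 2) 0 + 1 : Nat)) : Int) := by push_cast; ring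
      rw [hoa, PySem.List.slice_natCast]
      simp only [Option.map_some]
      rw [pvSliceBlock, ha, hb, ← hL, Nat.sub_sub]
  exact hmain (PySem.Str.lower (PySem.Str.strip marker)) (PySem.Str.splitlines text)
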